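-- pv_equiv track=rewrite | github.com/DannyJPark/DannyJPark.github.io | 2023_2nd_DataMining/assignment6.py | bfs
-- ===== SOURCE A (Python) =====
-- import collections
--
-- def bfs(adjacent_list, gene):
--     visited, queue = set(), collections.deque([gene])
--     visited.add(gene)
--     visited_list= list()
--     while queue:
--         vertex = queue.popleft()
--         for neighbour in adjacent_list[vertex]:
--             if neighbour not in visited:
--                 visited.add(neighbour)
--                 queue.append(neighbour)
--
--     visited_list = sorted(list(visited))
--     #print ("sub_graph = "+ str(len(visited_list)))
--     return visited_list
-- ===== SOURCE B (Python) =====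
-- def bfs(adjacent_list, gene):
--     reachable = {gene}
--     changed = True
--     while changed:
--         changed = False
--         for v in list(reachable):
--             for n in adjacent_list[v]:
--                 if n not in reachable:
--                     reachable.add(n)
--                     changed = True
--     return sorted(reachable)
-- ===== Notes on version B (the rewrite author's own statement) =====
-- stated objective: alternative
-- what changed: Replaces the FIFO-deque BFS (one popleft per vertex) with naive fixpoint iteration: repeatedly sweep a snapshot of the whole reachable set, adding every unseen neighbour, until one full sweep adds nothing, then sort; Pre_ excludes exactly the inputs where A raises KeyError (a vertex in the touched closure has no adjacency entry), on which B raises too.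
import Mathlib
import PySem

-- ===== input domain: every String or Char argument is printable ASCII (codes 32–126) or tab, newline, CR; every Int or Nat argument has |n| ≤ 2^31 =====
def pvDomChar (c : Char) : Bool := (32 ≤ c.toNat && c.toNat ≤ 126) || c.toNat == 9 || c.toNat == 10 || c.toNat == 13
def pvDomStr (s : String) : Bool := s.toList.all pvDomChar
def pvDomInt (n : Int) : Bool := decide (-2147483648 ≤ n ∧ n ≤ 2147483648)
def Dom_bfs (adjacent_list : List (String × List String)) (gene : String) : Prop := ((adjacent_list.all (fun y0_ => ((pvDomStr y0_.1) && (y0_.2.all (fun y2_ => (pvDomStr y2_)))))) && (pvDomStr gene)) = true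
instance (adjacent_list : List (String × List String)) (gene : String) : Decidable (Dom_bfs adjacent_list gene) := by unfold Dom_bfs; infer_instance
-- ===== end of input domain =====

-- B replaces A's FIFO-deque BFS (one popleft per vertex) with naive fixpoint iteration: sweep the
-- whole reachable set, adding unseen neighbours, until a sweep adds nothing; same sorted output.


-- ===== PORT A =====
-- adjacent_list[v]: first-match association-list lookup; Python raises KeyError when the key is
-- missing — those inputs are excluded by Pre_bfs, so the [] default is never reached there.
def bfsNbrs (adjacent_list : List (String × List String)) (v : String) : List String :=
  match adjacent_list.find? (fun p => p.1 == v) with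
  | some p => p.2
  | none => []

-- A's 3-line inner body: "if n not in visited: visited.add(n); queue.append(n)"
def bfsStep (s : PySem.Set String × List String) (n : String) : PySem.Set String × List String :=
  if n ∈ s.1 then s else (PySem.Set.add s.1 n, s.2 ++ [n])

-- termination bookkeeping (not part of the computation): every string ever added is in bfsUniv
def bfsUniv (adjacent_list : List (String × List String)) : List String :=
  adjacent_list.flatMap Prod.snd

def bfsMeas (U : List String) (s : PySem.Set String × List String) : Nat :=
  (U.filter (· ∉ s.1)).length + s.2.length

lemma bfsStep_meas (U : List String) {n : String} (hn : n ∈ U)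
    (s : PySem.Set String × List String) : bfsMeas U (bfsStep s n) ≤ bfsMeas U s := by
  unfold bfsStep
  by_cases h : n ∈ s.1
  · simp [h]
  · simp only [h, if_false]
    have hadd : PySem.Set.add s.1 n = s.1 ++ [n] := by
      simp [PySem.Set.add, PySem.Set.contains, h]
    unfold bfsMeas
    simp only [hadd, List.length_append, List.length_cons, List.length_nil]
    have hfe : U.filter (fun x => decide (x ∉ s.1 ++ [n]))
        = (U.filter (fun x => decide (x ∉ s.1))).filter (fun x => decide (¬ x = n)) := by
      rw [List.filter_filter]
      apply List.filter_congr
      intro x _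
      by_cases hx : x ∈ s.1 <;> by_cases hxn : x = n <;> simp [hx, hxn]
    have hlt : ((U.filter (fun x => decide (x ∉ s.1))).filter (fun x => decide (¬ x = n))).length
        < (U.filter (fun x => decide (x ∉ s.1))).length := by
      apply List.length_filter_lt_length_iff_exists.mpr
      exact ⟨n, by simp [hn, h], by simp⟩
    rw [hfe]
    omega

lemma foldl_bfsStep_meas (U : List String) (ns : List String) (hns : ∀ n ∈ ns, n ∈ U)
    (s : PySem.Set String × List String) : bfsMeas U (ns.foldl bfsStep s) ≤ bfsMeas U s := by
  induction ns generalizing s with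
  | nil => exact le_refl _
  | cons n ns ih =>
      simp only [List.foldl_cons]
      exact le_trans (ih (fun m hm => hns m (List.mem_cons_of_mem _ hm)) _)
        (bfsStep_meas U (hns n (List.mem_cons_self ..)) s)

lemma bfsNbrs_sub_univ (adjacent_list : List (String × List String)) (v : String) :
    ∀ n ∈ bfsNbrs adjacent_list v, n ∈ bfsUniv adjacent_list := by
  intro n hn
  unfold bfsNbrs at hn
  cases hfind : adjacent_list.find? (fun p => p.1 == v) with
  | none => rw [hfind] at hn; simp at hn
  | some p =>
      rw [hfind] at hn
      exact List.mem_flatMap.mpr ⟨p, List.mem_of_find?_eq_some hfind, hn⟩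

def bfsLoop (adjacent_list : List (String × List String)) (queue : List String)
    (visited : PySem.Set String) : PySem.Set String :=
  match queue with
  | [] => visited
  | vertex :: rest =>
      let st := (bfsNbrs adjacent_list vertex).foldl bfsStep (visited, rest)
      bfsLoop adjacent_list st.2 st.1
termination_by ((bfsUniv adjacent_list).filter (· ∉ visited)).length + queue.length
decreasing_by
  have h := foldl_bfsStep_meas (bfsUniv adjacent_list) (bfsNbrs adjacent_list vertex)
      (bfsNbrs_sub_univ adjacent_list vertex) (visited, rest)
  unfold bfsMeas at h
  simp only [List.length_cons] at h ⊢
  omega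

def bfs (adjacent_list : List (String × List String)) (gene : String) : List String :=
  let visited : PySem.Set String := PySem.Set.add PySem.Set.empty gene
  let res := bfsLoop adjacent_list [gene] visited
  PySem.List.sorted res (fun x => x) false

-- ===== PORT B =====
-- dict lookup for B, written via List.lookup (same first-match Python semantics)
def altNbrs (adjacent_list : List (String × List String)) (v : String) : List String :=
  (List.lookup v adjacent_list).getD []

-- B's inner body: "if n not in reachable: reachable.add(n); changed = True"
def bAdd (acc : PySem.Set String × Bool) (n : String) : PySem.Set String × Bool :=
  if n ∈ acc.1 then acc else (PySem.Set.add acc.1 n, true)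

-- one full sweep over the snapshot of the reachable set, threading the changed flag
def bRound (adjacent_list : List (String × List String)) (snapshot : List String)
    (acc : PySem.Set String × Bool) : PySem.Set String × Bool :=
  snapshot.foldl (fun a v => (altNbrs adjacent_list v).foldl bAdd a) acc

lemma altNbrs_eq_bfsNbrs (adjacent_list : List (String × List String)) (v : String) :
    altNbrs adjacent_list v = bfsNbrs adjacent_list v := by
  induction adjacent_list with
  | nil => rfl
  | cons p t ih =>
      obtain ⟨k, w⟩ := p
      by_cases h : k = v
      · subst h; simp [altNbrs, bfsNbrs, List.lookup]
      · have h1 : (v == k) = false := by simp [Ne.symm h]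
        have h2 : (k == v) = false := by simp [h]
        simpa [altNbrs, bfsNbrs, List.lookup, h1, h2] using ih

-- what a fold of bAdd does: appends a block `extra` of fresh elements, flag records whether any
lemma foldl_bAdd_spec (ns : List String) (acc : PySem.Set String × Bool) :
    ∃ extra : List String,
      (ns.foldl bAdd acc).1 = acc.1 ++ extra ∧
      (ns.foldl bAdd acc).2 = (acc.2 || !extra.isEmpty) ∧
      (∀ x ∈ extra, x ∈ ns ∧ x ∉ acc.1) ∧
      (∀ n ∈ ns, n ∈ acc.1 ++ extra) := by
  induction ns generalizing acc with
  | nil => exact ⟨[], by simp, by simp, by simp, by simp⟩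
  | cons n ns ih =>
      simp only [List.foldl_cons]
      by_cases h : n ∈ acc.1
      · have hb : bAdd acc n = acc := by simp [bAdd, h]
        rw [hb]
        obtain ⟨extra, h1, h2, h3, h4⟩ := ih acc
        refine ⟨extra, h1, h2, fun x hx => ⟨List.mem_cons_of_mem _ (h3 x hx).1, (h3 x hx).2⟩, ?_⟩
        intro m hm
        rcases List.mem_cons.mp hm with rfl | hm
        · exact List.mem_append.mpr (Or.inl h)
        · exact h4 m hm
      · have hb : bAdd acc n = (acc.1 ++ [n], true) := by
          simp [bAdd, h, PySem.Set.add, PySem.Set.contains]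
        rw [hb]
        obtain ⟨extra, h1, h2, h3, h4⟩ := ih (acc.1 ++ [n], true)
        refine ⟨n :: extra, ?_, ?_, ?_, ?_⟩
        · rw [h1]; simp
        · rw [h2]; simp
        · intro x hx
          rcases List.mem_cons.mp hx with rfl | hx
          · exact ⟨List.mem_cons_self .., h⟩
          · obtain ⟨hx1, hx2⟩ := h3 x hx
            exact ⟨List.mem_cons_of_mem _ hx1,
              fun hc => hx2 (List.mem_append.mpr (Or.inl hc))⟩
        · intro m hm
          rcases List.mem_cons.mp hm with rfl | hm
          · simp
          · have hx := h4 m hm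
            simpa [List.append_assoc] using hx

-- what one sweep does: appends a block of fresh neighbours, flag records whether any were added
lemma bRound_spec (adjacent_list : List (String × List String)) (snapshot : List String)
    (acc : PySem.Set String × Bool) :
    ∃ extra : List String,
      (bRound adjacent_list snapshot acc).1 = acc.1 ++ extra ∧
      (bRound adjacent_list snapshot acc).2 = (acc.2 || !extra.isEmpty) ∧
      (∀ x ∈ extra, (∃ v ∈ snapshot, x ∈ altNbrs adjacent_list v) ∧ x ∉ acc.1) ∧
      (∀ v ∈ snapshot, ∀ n ∈ altNbrs adjacent_list v, n ∈ acc.1 ++ extra) := by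
  induction snapshot generalizing acc with
  | nil => exact ⟨[], by simp [bRound], by simp [bRound], by simp, by simp⟩
  | cons v vs ih =>
      simp only [bRound, List.foldl_cons] at ih ⊢
      obtain ⟨e1, g1, g2, g3, g4⟩ := foldl_bAdd_spec (altNbrs adjacent_list v) acc
      obtain ⟨e2, k1, k2, k3, k4⟩ := ih ((altNbrs adjacent_list v).foldl bAdd acc)
      refine ⟨e1 ++ e2, ?_, ?_, ?_, ?_⟩
      · rw [k1, g1, List.append_assoc]
      · rw [k2, g2]; cases e1 <;> cases e2 <;> simp
      · intro x hx
        rcases List.mem_append.mp hx with hx | hx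
        · obtain ⟨hx1, hx2⟩ := g3 x hx
          exact ⟨⟨v, List.mem_cons_self .., hx1⟩, hx2⟩
        · obtain ⟨⟨v', hv', hx1⟩, hx2⟩ := k3 x hx
          rw [g1] at hx2
          exact ⟨⟨v', List.mem_cons_of_mem _ hv', hx1⟩,
            fun hc => hx2 (List.mem_append.mpr (Or.inl hc))⟩
      · intro u hu n hn
        rcases List.mem_cons.mp hu with rfl | hu
        · have hx := g4 n hn
          rcases List.mem_append.mp hx with h' | h'
          · exact List.mem_append.mpr (Or.inl h')
          · exact List.mem_append.mpr (Or.inr (List.mem_append.mpr (Or.inl h')))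
        · have hx := k4 u hu n hn
          rw [g1] at hx
          simpa [List.append_assoc] using hx

lemma bRound_meas_lt (adjacent_list : List (String × List String)) (reachable : PySem.Set String)
    (h : (bRound adjacent_list reachable (reachable, false)).2 = true) :
    ((bfsUniv adjacent_list).filter (· ∉ (bRound adjacent_list reachable (reachable, false)).1)).length
      < ((bfsUniv adjacent_list).filter (· ∉ reachable)).length := by
  obtain ⟨extra, h1, h2, h3, _⟩ := bRound_spec adjacent_list reachable (reachable, false)
  rw [h2] at h
  cases extra with
  | nil => simp at h
  | cons e es =>
      rw [h1]
      obtain ⟨⟨v, hv, hen⟩, hne⟩ := h3 e (List.mem_cons_self ..)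
      have heU : e ∈ bfsUniv adjacent_list := by
        rw [altNbrs_eq_bfsNbrs] at hen
        exact bfsNbrs_sub_univ adjacent_list v e hen
      have hfe : (bfsUniv adjacent_list).filter (fun x => decide (x ∉ reachable ++ e :: es))
          = ((bfsUniv adjacent_list).filter (fun x => decide (x ∉ reachable))).filter
              (fun x => decide (x ∉ e :: es)) := by
        rw [List.filter_filter]
        apply List.filter_congr
        intro x _
        by_cases hx : x ∈ reachable <;> by_cases hx2 : x ∈ e :: es <;> simp [hx, hx2]
      rw [hfe]
      apply List.length_filter_lt_length_iff_exists.mpr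
      exact ⟨e, by simp [heU, hne], by simp⟩

-- B's outer while loop: sweep; if the sweep changed something, loop on the grown set
def bLoop (adjacent_list : List (String × List String)) (reachable : PySem.Set String) :
    PySem.Set String :=
  if h : (bRound adjacent_list reachable (reachable, false)).2 = true then
    bLoop adjacent_list (bRound adjacent_list reachable (reachable, false)).1
  else reachable
termination_by ((bfsUniv adjacent_list).filter (· ∉ reachable)).length
decreasing_by exact bRound_meas_lt adjacent_list reachable h

def bfs_alt (adjacent_list : List (String × List String)) (gene : String) : List String :=
  let reachable : PySem.Set String := PySem.Set.ofList [gene]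
  PySem.List.sorted (bLoop adjacent_list reachable) (fun x => x) false

-- ===== PRECONDITION & SPEC =====
-- the set of vertices A's loop ever looks up: close {gene} under neighbours of keyed vertices
def preNbrs (adjacent_list : List (String × List String)) (v : String) : List String :=
  ((adjacent_list.find? (fun p => p.1 == v)).map Prod.snd).getD []

def preStep (adjacent_list : List (String × List String)) (S : List String) : List String :=
  S.foldl (fun T v => (preNbrs adjacent_list v).foldl PySem.Set.add T) S

def preClosure (adjacent_list : List (String × List String)) (gene : String) : List String :=
  (List.range (adjacent_list.flatMap Prod.snd).length).foldl
    (fun S _ => preStep adjacent_list S) [gene]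

-- Pre_ excludes exactly the inputs on which A raises KeyError: some vertex in the closure of
-- {gene} under neighbours-of-keyed-vertices has no adjacency entry (B raises KeyError there too).
def Pre_bfs (adjacent_list : List (String × List String)) (gene : String) : Prop :=
  ∀ x ∈ preClosure adjacent_list gene, x ∈ adjacent_list.map Prod.fst
instance (adjacent_list : List (String × List String)) (gene : String) :
    Decidable (Pre_bfs adjacent_list gene) := by unfold Pre_bfs; infer_instance

def pvWitness_bfs : (List (String × List String)) × String :=
  ([("a", ["b"]), ("b", ["a"]), ("c", [])], "a")

def Spec_bfs (adjacent_list : List (String × List String)) (gene : String) (out : List String) : Prop := out = bfs_alt adjacent_list gene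
instance (adjacent_list : List (String × List String)) (gene : String) (out : List String) : Decidable (Spec_bfs adjacent_list gene out) := by unfold Spec_bfs; infer_instance

-- ===== CLAIM (what is proved, stated in full; the proofs are below) =====
def Claim_equal_bfs : Prop := ∀ (adjacent_list : List (String × List String)) (gene : String), Dom_bfs adjacent_list gene → Pre_bfs adjacent_list gene → Spec_bfs adjacent_list gene (bfs adjacent_list gene)

-- ===== LEMMAS AND PROOFS =====

def EdgeR (adjacent_list : List (String × List String)) (u v : String) : Prop :=
  v ∈ bfsNbrs adjacent_list u

def ReachR (adjacent_list : List (String × List String)) (g x : String) : Prop :=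
  Relation.ReflTransGen (EdgeR adjacent_list) g x

lemma foldl_bfsStep_mem (ns : List String) (s : PySem.Set String × List String) (x : String) :
    (x ∈ (ns.foldl bfsStep s).1 ↔ x ∈ s.1 ∨ x ∈ ns) ∧
    (x ∈ (ns.foldl bfsStep s).2 ↔ x ∈ s.2 ∨ (x ∈ ns ∧ x ∉ s.1)) := by
  induction ns generalizing s with
  | nil => simp
  | cons n ns ih =>
      simp only [List.foldl_cons]
      by_cases h : n ∈ s.1
      · rw [show bfsStep s n = s from by simp [bfsStep, h]]
        obtain ⟨ih1, ih2⟩ := ih s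
        refine ⟨ih1.trans ?_, ih2.trans ?_⟩
        · simp only [List.mem_cons]
          constructor
          · tauto
          · rintro (hx | rfl | hx) <;> tauto
        · simp only [List.mem_cons]
          constructor
          · tauto
          · rintro (hx | ⟨(rfl | hx), hnx⟩) <;> tauto
      · rw [show bfsStep s n = (s.1 ++ [n], s.2 ++ [n]) from by
            simp [bfsStep, PySem.Set.add, PySem.Set.contains, h]]
        obtain ⟨ih1, ih2⟩ := ih (s.1 ++ [n], s.2 ++ [n])
        refine ⟨ih1.trans ?_, ih2.trans ?_⟩
        · simp only [List.mem_append, List.mem_cons, List.not_mem_nil]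
          tauto
        · simp only [List.mem_append, List.mem_cons, List.not_mem_nil]
          by_cases hxn : x = n
          · subst hxn; tauto
          · tauto

lemma foldl_bfsStep_nodup (ns : List String) (s : PySem.Set String × List String)
    (h : s.1.Nodup) : (ns.foldl bfsStep s).1.Nodup := by
  induction ns generalizing s with
  | nil => exact h
  | cons n ns ih =>
      simp only [List.foldl_cons]
      apply ih
      unfold bfsStep
      by_cases hn : n ∈ s.1
      · simpa [hn]
      · have hadd : PySem.Set.add s.1 n = s.1 ++ [n] := by
          simp [PySem.Set.add, PySem.Set.contains, hn]
        simp only [hn, if_false, hadd]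
        simp [List.nodup_append, h]
        exact fun a ha han => hn (han ▸ ha)

lemma bfsLoop_mem (adjacent_list : List (String × List String)) (queue : List String)
    (visited : PySem.Set String) :
    (∀ q ∈ queue, q ∈ visited) →
    (∀ y ∈ visited, y ∉ queue → ∀ n ∈ bfsNbrs adjacent_list y, n ∈ visited) →
    ∀ x, x ∈ bfsLoop adjacent_list queue visited ↔ ∃ s ∈ visited, ReachR adjacent_list s x := by
  induction queue, visited using bfsLoop.induct (adjacent_list := adjacent_list) with
  | case1 visited =>
      intro _ hsat x
      rw [show bfsLoop adjacent_list [] visited = visited from by rw [bfsLoop]]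
      constructor
      · exact fun hx => ⟨x, hx, Relation.ReflTransGen.refl⟩
      · rintro ⟨s, hs, hreach⟩
        induction hreach with
        | refl => exact hs
        | tail _ e ih => exact hsat _ ih List.not_mem_nil _ e
  | case2 visited vertex rest st ih =>
      intro hqv hsat x
      rw [show bfsLoop adjacent_list (vertex :: rest) visited = bfsLoop adjacent_list st.2 st.1
            from by rw [bfsLoop]]
      have hm1 := fun y => (foldl_bfsStep_mem (bfsNbrs adjacent_list vertex) (visited, rest) y).1
      have hm2 := fun y => (foldl_bfsStep_mem (bfsNbrs adjacent_list vertex) (visited, rest) y).2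
      simp only [st] at *
      have hvertex : vertex ∈ visited := hqv vertex (List.mem_cons_self ..)
      have hqv' : ∀ q ∈ (List.foldl bfsStep (visited, rest) (bfsNbrs adjacent_list vertex)).2,
          q ∈ (List.foldl bfsStep (visited, rest) (bfsNbrs adjacent_list vertex)).1 := by
        intro q hq
        rcases (hm2 q).1 hq with hq | ⟨hq, _⟩
        · exact (hm1 q).2 (Or.inl (hqv q (List.mem_cons_of_mem _ hq)))
        · exact (hm1 q).2 (Or.inr hq)
      have hsat' : ∀ y ∈ (List.foldl bfsStep (visited, rest) (bfsNbrs adjacent_list vertex)).1,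
          y ∉ (List.foldl bfsStep (visited, rest) (bfsNbrs adjacent_list vertex)).2 →
          ∀ n ∈ bfsNbrs adjacent_list y,
            n ∈ (List.foldl bfsStep (visited, rest) (bfsNbrs adjacent_list vertex)).1 := by
        intro y hy hny n hn
        rcases (hm1 y).1 hy with hyv | hyn
        · by_cases hyq : y ∈ rest
          · exact absurd ((hm2 y).2 (Or.inl hyq)) hny
          · by_cases hyx : y = vertex
            · exact (hm1 n).2 (Or.inr (hyx ▸ hn))
            · have : y ∉ vertex :: rest := by simp [hyx, hyq]
              exact (hm1 n).2 (Or.inl (hsat y hyv this n hn))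
        · by_cases hyv : y ∈ visited
          · by_cases hyq : y ∈ rest
            · exact absurd ((hm2 y).2 (Or.inl hyq)) hny
            · by_cases hyx : y = vertex
              · exact (hm1 n).2 (Or.inr (hyx ▸ hn))
              · have : y ∉ vertex :: rest := by simp [hyx, hyq]
                exact (hm1 n).2 (Or.inl (hsat y hyv this n hn))
          · exact absurd ((hm2 y).2 (Or.inr ⟨hyn, hyv⟩)) hny
      rw [ih hqv' hsat' x]
      constructor
      · rintro ⟨s, hs, hreach⟩
        rcases (hm1 s).1 hs with hsv | hsn
        · exact ⟨s, hsv, hreach⟩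
        · exact ⟨vertex, hvertex, Relation.ReflTransGen.head hsn hreach⟩
      · rintro ⟨s, hs, hreach⟩
        exact ⟨s, (hm1 s).2 (Or.inl hs), hreach⟩

lemma bfsLoop_nodup (adjacent_list : List (String × List String)) (queue : List String)
    (visited : PySem.Set String) (h : visited.Nodup) :
    (bfsLoop adjacent_list queue visited).Nodup := by
  induction queue, visited using bfsLoop.induct (adjacent_list := adjacent_list) with
  | case1 visited => rw [show bfsLoop adjacent_list [] visited = visited from by rw [bfsLoop]]; exact h
  | case2 visited vertex rest st ih =>
      rw [show bfsLoop adjacent_list (vertex :: rest) visited = bfsLoop adjacent_list st.2 st.1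
            from by rw [bfsLoop]]
      exact ih (foldl_bfsStep_nodup _ _ h)

lemma bLoop_mem (adjacent_list : List (String × List String)) (reachable : PySem.Set String) :
    ∀ x, x ∈ bLoop adjacent_list reachable ↔ ∃ s ∈ reachable, ReachR adjacent_list s x := by
  induction reachable using bLoop.induct (adjacent_list := adjacent_list) with
  | case1 reachable h ih =>
      intro x
      rw [show bLoop adjacent_list reachable
            = bLoop adjacent_list (bRound adjacent_list reachable (reachable, false)).1
          from by rw [bLoop, dif_pos h], ih x]
      obtain ⟨extra, h1, _, h3, _⟩ := bRound_spec adjacent_list reachable (reachable, false)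
      rw [h1]
      constructor
      · rintro ⟨s, hs, hreach⟩
        rcases List.mem_append.mp hs with hs | hs
        · exact ⟨s, hs, hreach⟩
        · obtain ⟨⟨v, hv, hsn⟩, _⟩ := h3 s hs
          rw [altNbrs_eq_bfsNbrs] at hsn
          exact ⟨v, hv, Relation.ReflTransGen.head hsn hreach⟩
      · rintro ⟨s, hs, hreach⟩
        exact ⟨s, List.mem_append.mpr (Or.inl hs), hreach⟩
  | case2 reachable h =>
      intro x
      rw [show bLoop adjacent_list reachable = reachable from by rw [bLoop, dif_neg h]]
      obtain ⟨extra, _, h2, _, h4⟩ := bRound_spec adjacent_list reachable (reachable, false)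
      have hext : extra = [] := by
        rw [h2] at h
        cases extra with
        | nil => rfl
        | cons e es => simp at h
      have hclosed : ∀ v ∈ reachable, ∀ n ∈ bfsNbrs adjacent_list v, n ∈ reachable := by
        intro v hv n hn
        rw [← altNbrs_eq_bfsNbrs] at hn
        have hx := h4 v hv n hn
        simpa [hext] using hx
      constructor
      · exact fun hx => ⟨x, hx, Relation.ReflTransGen.refl⟩
      · rintro ⟨s, hs, hreach⟩
        induction hreach with
        | refl => exact hs
        | tail _ e ih => exact hclosed _ ih _ e

lemma bLoop_nodup (adjacent_list : List (String × List String)) (reachable : PySem.Set String)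
    (h : reachable.Nodup) : (bLoop adjacent_list reachable).Nodup := by
  induction reachable using bLoop.induct (adjacent_list := adjacent_list) with
  | case1 reachable hc ih =>
      rw [show bLoop adjacent_list reachable
            = bLoop adjacent_list (bRound adjacent_list reachable (reachable, false)).1
          from by rw [bLoop, dif_pos hc]]
      obtain ⟨extra, h1, _, h3, _⟩ := bRound_spec adjacent_list reachable (reachable, false)
      apply ih
      rw [h1]
      -- reachable ++ extra is nodup: the fold of bAdd only appends fresh elements
      have : (bRound adjacent_list reachable (reachable, false)).1.Nodup := by
        unfold bRound
        have hgen : ∀ (vs : List String) (acc : PySem.Set String × Bool), acc.1.Nodup →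
            (vs.foldl (fun a v => (altNbrs adjacent_list v).foldl bAdd a) acc).1.Nodup := by
          intro vs
          induction vs with
          | nil => intro acc hacc; exact hacc
          | cons v vs ihv =>
              intro acc hacc
              simp only [List.foldl_cons]
              apply ihv
              have hg : ∀ (ns : List String) (a : PySem.Set String × Bool), a.1.Nodup →
                  (ns.foldl bAdd a).1.Nodup := by
                intro ns
                induction ns with
                | nil => intro a ha; exact ha
                | cons n ns ihn =>
                    intro a ha
                    simp only [List.foldl_cons]
                    apply ihn
                    unfold bAdd
                    by_cases hn : n ∈ a.1
                    · simpa [hn]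
                    · have hadd : PySem.Set.add a.1 n = a.1 ++ [n] := by
                        simp [PySem.Set.add, PySem.Set.contains, hn]
                      simp only [hn, if_false, hadd]
                      simp [List.nodup_append, ha]
                      exact fun b hb hbn => hn (hbn ▸ hb)
              exact hg _ acc hacc
        exact hgen reachable (reachable, false) h
      rw [h1] at this
      exact this
  | case2 reachable hc =>
      rw [show bLoop adjacent_list reachable = reachable from by rw [bLoop, dif_neg hc]]
      exact h

lemma bfs_result_mem (adjacent_list : List (String × List String)) (gene x : String) :
    x ∈ bfsLoop adjacent_list [gene] [gene] ↔ ReachR adjacent_list gene x := by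
  rw [bfsLoop_mem adjacent_list [gene] [gene]
      (by intro q hq; simpa using hq)
      (by intro y hy hny; exact absurd hy hny) x]
  simp

lemma bfs_alt_result_mem (adjacent_list : List (String × List String)) (gene x : String) :
    x ∈ bLoop adjacent_list [gene] ↔ ReachR adjacent_list gene x := by
  rw [bLoop_mem adjacent_list [gene] x]
  simp

-- ===== VERDICT (by name: the statement is the Claim_ definition above) =====
theorem bfs_spec : Claim_equal_bfs := by
  intro adjacent_list gene _ _
  unfold Spec_bfs bfs bfs_alt
  have hg1 : PySem.Set.add PySem.Set.empty gene = [gene] := rfl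
  have hg2 : PySem.Set.ofList [gene] = [gene] := rfl
  rw [hg1, hg2]
  apply PySem.List.sorted_eq_sorted_of_perm _ _ _ (fun a b h => h)
  rw [List.perm_ext_iff_of_nodup
      (bfsLoop_nodup adjacent_list [gene] [gene] (by simp))
      (bLoop_nodup adjacent_list [gene] (by simp))]
  intro a
  rw [bfs_result_mem, bfs_alt_result_mem]
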